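-- pv_equiv track=rewrite | github.com/snowdutra/Python-Development | matriz_produto.py | produto
-- ===== SOURCE A (Python) =====
-- def produto(matriz, matriz_tamanho):
--     maior_produto = 0
--
--     for i in range(matriz_tamanho):
--         for j in range(matriz_tamanho - 3):
--             produto = matriz[i][j] * matriz[i][j+1] * matriz[i][j+2] * matriz[i][j+3]
--             if produto > maior_produto:
--                 maior_produto = produto
--
--     for i in range(matriz_tamanho - 3):
--         for j in range(matriz_tamanho):
--             produto = matriz[i][j] * matriz[i+1][j] * matriz[i+2][j] * matriz[i+3][j]
--             if produto > maior_produto: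
--                 maior_produto = produto
--
--     for i in range(matriz_tamanho - 3):
--         for j in range(matriz_tamanho - 3):
--             produto = matriz[i][j] * matriz[i+1][j+1] * matriz[i+2][j+2] * matriz[i+3][j+3]
--             if produto > maior_produto:
--                 maior_produto = produto
--
--     for i in range(matriz_tamanho - 3):
--         for j in range(3, matriz_tamanho):
--             produto = matriz[i][j] * matriz[i+1][j-1] * matriz[i+2][j-2] * matriz[i+3][j-3]
--             if produto > maior_produto:
--                 maior_produto = produto
--
--     return maior_produto
-- ===== SOURCE B (Python) =====
-- def produto(matriz, matriz_tamanho):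
--     n = matriz_tamanho
--     if n < 4:            # no window of 4 adjacent cells fits
--         return 0
--     lines = []
--     for i in range(n):                      # rows
--         lines.append([matriz[i][j] for j in range(n)])
--     for j in range(n):                      # columns
--         lines.append([matriz[i][j] for i in range(n)])
--     for s in range(1 - n, n):               # diagonals (down-right), j - i == s
--         lines.append([matriz[i][i + s] for i in range(max(0, -s), min(n, n - s))])
--     for s in range(2 * n - 1):              # anti-diagonals (down-left), i + j == s
--         lines.append([matriz[i][s - i] for i in range(max(0, s - n + 1), min(n, s + 1))])
--     maior_produto = 0
--     for linha in lines:
--         for k in range(len(linha) - 3):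
--             p = linha[k] * linha[k + 1] * linha[k + 2] * linha[k + 3]
--             if p > maior_produto:
--                 maior_produto = p
--     return maior_produto
-- ===== Notes on version B (the rewrite author's own statement) =====
-- stated objective: alternative
-- what changed: Instead of A's four separate 2-D directional double-loops, B first extracts every line of the matrix (rows, columns, diagonals, anti-diagonals) as an explicit 1-D list and then runs one generic sliding-window pass computing 4-products over each line.
import Mathlib
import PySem

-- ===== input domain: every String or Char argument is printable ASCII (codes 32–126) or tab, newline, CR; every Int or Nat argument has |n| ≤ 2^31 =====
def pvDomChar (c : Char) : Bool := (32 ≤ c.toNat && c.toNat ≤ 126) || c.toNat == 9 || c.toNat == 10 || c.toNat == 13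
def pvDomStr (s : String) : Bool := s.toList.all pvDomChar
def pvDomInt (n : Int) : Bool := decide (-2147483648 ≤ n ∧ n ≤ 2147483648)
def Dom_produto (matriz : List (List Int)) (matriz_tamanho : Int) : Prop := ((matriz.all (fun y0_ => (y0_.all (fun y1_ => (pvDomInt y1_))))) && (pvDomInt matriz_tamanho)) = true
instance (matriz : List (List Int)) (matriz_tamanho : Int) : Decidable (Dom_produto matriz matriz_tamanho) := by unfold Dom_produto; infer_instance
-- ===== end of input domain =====

set_option maxHeartbeats 1000000


-- B replaces A's four 2-D directional passes by extracting every line of the matrix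
-- (rows, columns, diagonals, anti-diagonals) as a 1-D list and running one generic
-- sliding-window 4-product pass over each line (alternative decomposition, same cost).

-- ===== PORT A =====
-- matriz[i][j] (all reachable indices are nonnegative; Pre_ rules out IndexError, so the
-- `.getD 0` default is never taken on admitted inputs)
def mget (matriz : List (List Int)) (i j : Int) : Int :=
  ((PySem.List.pyGet? matriz i).bind (fun row => PySem.List.pyGet? row j)).getD 0

def produto (matriz : List (List Int)) (matriz_tamanho : Int) : Int :=
  let m1 := (PySem.List.pyRange 0 matriz_tamanho 1).foldl (fun acc i =>
    (PySem.List.pyRange 0 (matriz_tamanho - 3) 1).foldl (fun acc j =>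
      let p := mget matriz i j * mget matriz i (j+1) * mget matriz i (j+2) * mget matriz i (j+3)
      if p > acc then p else acc) acc) 0
  let m2 := (PySem.List.pyRange 0 (matriz_tamanho - 3) 1).foldl (fun acc i =>
    (PySem.List.pyRange 0 matriz_tamanho 1).foldl (fun acc j =>
      let p := mget matriz i j * mget matriz (i+1) j * mget matriz (i+2) j * mget matriz (i+3) j
      if p > acc then p else acc) acc) m1
  let m3 := (PySem.List.pyRange 0 (matriz_tamanho - 3) 1).foldl (fun acc i =>
    (PySem.List.pyRange 0 (matriz_tamanho - 3) 1).foldl (fun acc j =>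
      let p := mget matriz i j * mget matriz (i+1) (j+1) * mget matriz (i+2) (j+2) * mget matriz (i+3) (j+3)
      if p > acc then p else acc) acc) m2
  let m4 := (PySem.List.pyRange 0 (matriz_tamanho - 3) 1).foldl (fun acc i =>
    (PySem.List.pyRange 3 matriz_tamanho 1).foldl (fun acc j =>
      let p := mget matriz i j * mget matriz (i+1) (j-1) * mget matriz (i+2) (j-2) * mget matriz (i+3) (j-3)
      if p > acc then p else acc) acc) m3
  m4

-- ===== PORT B =====
-- linha[k] (k always in range inside B's window loop, so the default is never taken)
def lget (linha : List Int) (k : Int) : Int := PySem.List.pyGetD linha k 0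

def linesB (matriz : List (List Int)) (n : Int) : List (List Int) :=
  ((PySem.List.pyRange 0 n 1).map (fun i =>
      (PySem.List.pyRange 0 n 1).map (fun j => mget matriz i j)))
  ++ ((PySem.List.pyRange 0 n 1).map (fun j =>
      (PySem.List.pyRange 0 n 1).map (fun i => mget matriz i j)))
  ++ ((PySem.List.pyRange (1 - n) n 1).map (fun s =>
      (PySem.List.pyRange (max 0 (-s)) (min n (n - s)) 1).map (fun i => mget matriz i (i + s))))
  ++ ((PySem.List.pyRange 0 (2 * n - 1) 1).map (fun s =>
      (PySem.List.pyRange (max 0 (s - n + 1)) (min n (s + 1)) 1).map (fun i => mget matriz i (s - i))))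

def produto_alt (matriz : List (List Int)) (matriz_tamanho : Int) : Int :=
  if matriz_tamanho < 4 then 0 else   -- no window of 4 adjacent cells fits
  (linesB matriz matriz_tamanho).foldl (fun acc linha =>
    (PySem.List.pyRange 0 ((linha.length : Int) - 3) 1).foldl (fun acc k =>
      let p := lget linha k * lget linha (k+1) * lget linha (k+2) * lget linha (k+3)
      if p > acc then p else acc) acc) 0

-- ===== PRECONDITION & SPEC =====
-- Pre_ excludes exactly the inputs where Python A raises IndexError: for matriz_tamanho ≥ 4 both
-- programs read every cell (i, j) with 0 ≤ i, j < matriz_tamanho, so the first matriz_tamanho rows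
-- must exist and each have at least matriz_tamanho entries; for matriz_tamanho ≤ 3 all loops that
-- index are empty and A returns 0 on any matriz.
def Pre_produto (matriz : List (List Int)) (matriz_tamanho : Int) : Prop :=
  matriz_tamanho ≤ 3 ∨
    (matriz_tamanho ≤ (matriz.length : Int) ∧
      ∀ row ∈ matriz.take matriz_tamanho.toNat, matriz_tamanho ≤ (row.length : Int))
instance (matriz : List (List Int)) (matriz_tamanho : Int) : Decidable (Pre_produto matriz matriz_tamanho) := by
  unfold Pre_produto; infer_instance

def pvWitness_produto : List (List Int) × Int :=
  ([[1, 2, 3, 4], [5, 6, 7, 8], [9, 10, 11, 12], [13, 14, 15, 16]], 4)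

def Spec_produto (matriz : List (List Int)) (matriz_tamanho : Int) (out : Int) : Prop := out = produto_alt matriz matriz_tamanho
instance (matriz : List (List Int)) (matriz_tamanho : Int) (out : Int) : Decidable (Spec_produto matriz matriz_tamanho out) := by unfold Spec_produto; infer_instance

-- ===== CLAIM (what is proved, stated in full; the proofs are below) =====
def Claim_equal_produto : Prop := ∀ (matriz : List (List Int)) (matriz_tamanho : Int), Dom_produto matriz matriz_tamanho → Pre_produto matriz matriz_tamanho → Spec_produto matriz matriz_tamanho (produto matriz matriz_tamanho)

-- ===== LEMMAS AND PROOFS =====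

lemma ite_gt_eq_max (a p : Int) : (if p > a then p else a) = max a p := by
  simp only [max_def]; split_ifs <;> omega

lemma le_foldlMax (L : List Int) (a : Int) : a ≤ L.foldl max a := by
  induction L generalizing a with
  | nil => exact le_rfl
  | cons x L ih => exact le_trans (le_max_left a x) (ih (max a x))

lemma mem_le_foldlMax {x : Int} (L : List Int) (a : Int) (h : x ∈ L) : x ≤ L.foldl max a := by
  induction L generalizing a with
  | nil => cases h
  | cons y L ih =>
    rcases List.mem_cons.mp h with rfl | h'
    · exact le_trans (le_max_right a x) (le_foldlMax L (max a x))
    · exact ih (max a y) h'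

lemma foldlMax_cases (L : List Int) (a : Int) : L.foldl max a = a ∨ L.foldl max a ∈ L := by
  induction L generalizing a with
  | nil => exact Or.inl rfl
  | cons x L ih =>
    rw [List.foldl_cons]
    rcases ih (max a x) with h | h
    · rw [h]
      rcases max_choice a x with h2 | h2
      · exact Or.inl h2
      · exact Or.inr (by rw [h2]; exact List.mem_cons_self)
    · exact Or.inr (List.mem_cons_of_mem _ h)

lemma foldlMax_eq_of_mem_iff (L1 L2 : List Int) (h : ∀ x, x ∈ L1 ↔ x ∈ L2) :
    L1.foldl max 0 = L2.foldl max 0 := by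
  apply le_antisymm
  · rcases foldlMax_cases L1 0 with h1 | h1
    · rw [h1]; exact le_foldlMax L2 0
    · exact mem_le_foldlMax L2 0 ((h _).mp h1)
  · rcases foldlMax_cases L2 0 with h1 | h1
    · rw [h1]; exact le_foldlMax L1 0
    · exact mem_le_foldlMax L1 0 ((h _).mpr h1)

lemma foldl_fun_congr (f g : Int → Int → Int) (h : ∀ a x, f a x = g a x) (l : List Int) (a : Int) :
    l.foldl f a = l.foldl g a := by
  have hfg : f = g := funext fun a => funext (h a)
  rw [hfg]

-- one directional pass of A = foldl max over the flat list of its products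
lemma pass_eq (g : Int → Int → Int) (R1 R2 : List Int) (a : Int) :
    R1.foldl (fun acc i => R2.foldl (fun acc j => if g i j > acc then g i j else acc) acc) a
      = (R1.flatMap (fun i => R2.map (g i))).foldl max a := by
  induction R1 generalizing a with
  | nil => rfl
  | cons i R1 ih =>
    rw [List.foldl_cons, List.flatMap_cons, List.foldl_append, ih, List.foldl_map]
    congr 1
    exact foldl_fun_congr _ _ (fun b x => ite_gt_eq_max b (g i x)) _ _

lemma flat_fold_eq {α : Type} (h : α → List Int) (R : List α) (a : Int) :
    R.foldl (fun acc i => (h i).foldl max acc) a = (R.flatMap h).foldl max a := by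
  induction R generalizing a with
  | nil => rfl
  | cons i R ih => rw [List.foldl_cons, List.flatMap_cons, List.foldl_append, ih]

-- the four flat product lists of A
def Lrow (m : List (List Int)) (t : Int) : List Int :=
  (PySem.List.pyRange 0 t 1).flatMap (fun i => (PySem.List.pyRange 0 (t - 3) 1).map
    (fun j => mget m i j * mget m i (j+1) * mget m i (j+2) * mget m i (j+3)))
def Lcol (m : List (List Int)) (t : Int) : List Int :=
  (PySem.List.pyRange 0 (t - 3) 1).flatMap (fun i => (PySem.List.pyRange 0 t 1).map
    (fun j => mget m i j * mget m (i+1) j * mget m (i+2) j * mget m (i+3) j))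
def Ldia (m : List (List Int)) (t : Int) : List Int :=
  (PySem.List.pyRange 0 (t - 3) 1).flatMap (fun i => (PySem.List.pyRange 0 (t - 3) 1).map
    (fun j => mget m i j * mget m (i+1) (j+1) * mget m (i+2) (j+2) * mget m (i+3) (j+3)))
def Lant (m : List (List Int)) (t : Int) : List Int :=
  (PySem.List.pyRange 0 (t - 3) 1).flatMap (fun i => (PySem.List.pyRange 3 t 1).map
    (fun j => mget m i j * mget m (i+1) (j-1) * mget m (i+2) (j-2) * mget m (i+3) (j-3)))

def LA (m : List (List Int)) (t : Int) : List Int :=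
  ((Lrow m t ++ Lcol m t) ++ Ldia m t) ++ Lant m t

-- the sliding-window product list of one line, and B's flat product list
def prod4 (l : List Int) (k : Int) : Int :=
  lget l k * lget l (k+1) * lget l (k+2) * lget l (k+3)

def Wline (l : List Int) : List Int :=
  (PySem.List.pyRange 0 ((l.length : Int) - 3) 1).map (prod4 l)

def LB (m : List (List Int)) (t : Int) : List Int :=
  (linesB m t).flatMap Wline

lemma produto_eq_LA (m : List (List Int)) (t : Int) :
    produto m t = (LA m t).foldl max 0 := by
  unfold produto LA Lrow Lcol Ldia Lant
  simp only [pass_eq, List.foldl_append]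

lemma win_fold (l : List Int) (a : Int) :
    (PySem.List.pyRange 0 ((l.length : Int) - 3) 1).foldl (fun acc k =>
      let p := lget l k * lget l (k+1) * lget l (k+2) * lget l (k+3)
      if p > acc then p else acc) a = (Wline l).foldl max a := by
  unfold Wline
  rw [List.foldl_map]
  exact foldl_fun_congr _ _ (fun b k => ite_gt_eq_max b (prod4 l k)) _ _

lemma foldl_id {α : Type} (l : List α) (a : Int) : l.foldl (fun acc _ => acc) a = a := by
  induction l generalizing a with
  | nil => rfl
  | cons x l ih => exact ih a

lemma produto_small (m : List (List Int)) (t : Int) (h : t < 4) : produto m t = 0 := by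
  have h1 : PySem.List.pyRange 0 (t - 3) 1 = [] := PySem.List.pyRange_one_eq_nil (by omega)
  have h2 : PySem.List.pyRange 3 t 1 = [] := PySem.List.pyRange_one_eq_nil (by omega)
  unfold produto
  rw [h1, h2]
  simp only [List.foldl_nil, foldl_id]

lemma produto_alt_eq_LB (m : List (List Int)) (t : Int) (h : ¬ t < 4) :
    produto_alt m t = (LB m t).foldl max 0 := by
  unfold produto_alt LB
  rw [if_neg h]
  rw [show (fun (acc : Int) (linha : List Int) =>
      (PySem.List.pyRange 0 ((linha.length : Int) - 3) 1).foldl (fun acc k =>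
        let p := lget linha k * lget linha (k+1) * lget linha (k+2) * lget linha (k+3)
        if p > acc then p else acc) acc)
    = (fun (acc : Int) (linha : List Int) => (Wline linha).foldl max acc)
    from funext fun acc => funext fun l => win_fold l acc]
  exact flat_fold_eq Wline (linesB m t) 0

-- k-th element of a comprehension over a range
lemma lget_map_pyRange (f : Int → Int) (a b k : Int) (h0 : 0 ≤ k) (h1 : k < b - a) :
    lget ((PySem.List.pyRange a b 1).map f) k = f (a + k) := by
  unfold lget
  have hk : k = ((k.toNat : Nat) : Int) := by omega
  rw [hk, PySem.List.pyGetD_map_pyRange_one f a b k.toNat 0 (by omega)]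

lemma len_map_pyRange (f : Int → Int) (a b : Int) :
    (((PySem.List.pyRange a b 1).map f).length : Int) = ((b - a).toNat : Int) := by
  rw [List.length_map, PySem.List.length_pyRange_one]

-- window k of a line over range [a,b) is the 4-product starting at cell a+k
lemma prod4_map_pyRange (f : Int → Int) (a b k : Int) (h0 : 0 ≤ k) (h1 : k + 3 < b - a) :
    prod4 ((PySem.List.pyRange a b 1).map f) k = f (a+k) * f (a+k+1) * f (a+k+2) * f (a+k+3) := by
  unfold prod4
  rw [lget_map_pyRange f a b k h0 (by omega), lget_map_pyRange f a b (k+1) (by omega) (by omega),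
      lget_map_pyRange f a b (k+2) (by omega) (by omega), lget_map_pyRange f a b (k+3) (by omega) (by omega)]
  ring_nf

lemma mem_Wline_map_pyRange (f : Int → Int) (a b : Int) (x : Int) :
    x ∈ Wline ((PySem.List.pyRange a b 1).map f) ↔
      ∃ k : Int, 0 ≤ k ∧ k + 3 < b - a ∧ x = f (a+k) * f (a+k+1) * f (a+k+2) * f (a+k+3) := by
  unfold Wline
  rw [len_map_pyRange]
  simp only [List.mem_map, PySem.List.mem_pyRange_one]
  constructor
  · rintro ⟨k, ⟨hk0, hk1⟩, rfl⟩
    exact ⟨k, hk0, by omega, prod4_map_pyRange f a b k hk0 (by omega)⟩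
  · rintro ⟨k, hk0, hk1, rfl⟩
    exact ⟨k, ⟨hk0, by omega⟩, prod4_map_pyRange f a b k hk0 (by omega)⟩

lemma mem_LA_iff_LB (m : List (List Int)) (t : Int) (x : Int) :
    x ∈ LA m t ↔ x ∈ LB m t := by
  have hB : x ∈ LB m t ↔
      (∃ i, (0 ≤ i ∧ i < t) ∧ x ∈ Wline ((PySem.List.pyRange 0 t 1).map (fun j => mget m i j))) ∨
      (∃ j, (0 ≤ j ∧ j < t) ∧ x ∈ Wline ((PySem.List.pyRange 0 t 1).map (fun i => mget m i j))) ∨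
      (∃ s, (1 - t ≤ s ∧ s < t) ∧ x ∈ Wline ((PySem.List.pyRange (max 0 (-s)) (min t (t - s)) 1).map (fun i => mget m i (i + s)))) ∨
      (∃ s, (0 ≤ s ∧ s < 2 * t - 1) ∧ x ∈ Wline ((PySem.List.pyRange (max 0 (s - t + 1)) (min t (s + 1)) 1).map (fun i => mget m i (s - i)))) := by
    unfold LB linesB
    simp only [List.flatMap_append, List.mem_append, List.flatMap_map, List.mem_flatMap,
      PySem.List.mem_pyRange_one]
    constructor
    · rintro (((⟨i, hi, hx⟩ | ⟨j, hj, hx⟩) | ⟨s, hs, hx⟩) | ⟨s, hs, hx⟩)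
      · exact Or.inl ⟨i, hi, hx⟩
      · exact Or.inr (Or.inl ⟨j, hj, hx⟩)
      · exact Or.inr (Or.inr (Or.inl ⟨s, hs, hx⟩))
      · exact Or.inr (Or.inr (Or.inr ⟨s, hs, hx⟩))
    · rintro (⟨i, hi, hx⟩ | ⟨j, hj, hx⟩ | ⟨s, hs, hx⟩ | ⟨s, hs, hx⟩)
      · exact Or.inl (Or.inl (Or.inl ⟨i, hi, hx⟩))
      · exact Or.inl (Or.inl (Or.inr ⟨j, hj, hx⟩))
      · exact Or.inl (Or.inr ⟨s, hs, hx⟩)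
      · exact Or.inr ⟨s, hs, hx⟩
  rw [hB]
  clear hB
  simp only [mem_Wline_map_pyRange]
  unfold LA Lrow Lcol Ldia Lant
  simp only [List.mem_append, List.mem_flatMap, List.mem_map, PySem.List.mem_pyRange_one]
  constructor
  · rintro (((⟨i, hi, j, hj, rfl⟩ | ⟨i, hi, j, hj, rfl⟩) | ⟨i, hi, j, hj, rfl⟩) | ⟨i, hi, j, hj, rfl⟩)
    · -- row window
      exact Or.inl ⟨i, hi, j, hj.1, by omega, by ring_nf⟩
    · -- column window
      exact Or.inr (Or.inl ⟨j, hj, i, hi.1, by omega, by ring_nf⟩)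
    · -- diagonal window: s = j - i, k = i - lo with lo = max 0 (-s)
      refine Or.inr (Or.inr (Or.inl ⟨j - i, by omega, i - max 0 (-(j - i)), by omega, by omega, ?_⟩))
      have h1 : max 0 (-(j - i)) + (i - max 0 (-(j - i))) = i := by omega
      rw [h1]
      have h2 : i + (j - i) = j := by omega
      have h3 : i + 1 + (j - i) = j + 1 := by omega
      have h4 : i + 2 + (j - i) = j + 2 := by omega
      have h5 : i + 3 + (j - i) = j + 3 := by omega
      rw [h2, h3, h4, h5]
    · -- anti-diagonal window: s = i + j, k = i - lo with lo = max 0 (s - t + 1)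
      refine Or.inr (Or.inr (Or.inr ⟨i + j, by omega, i - max 0 (i + j - t + 1), by omega, by omega, ?_⟩))
      have h1 : max 0 (i + j - t + 1) + (i - max 0 (i + j - t + 1)) = i := by omega
      rw [h1]
      have h2 : i + j - i = j := by omega
      have h3 : i + j - (i + 1) = j - 1 := by omega
      have h4 : i + j - (i + 2) = j - 2 := by omega
      have h5 : i + j - (i + 3) = j - 3 := by omega
      rw [h2, h3, h4, h5]
  · rintro (⟨i, hi, k, hk0, hk1, rfl⟩ | ⟨j, hj, k, hk0, hk1, rfl⟩ | ⟨s, hs, k, hk0, hk1, rfl⟩ | ⟨s, hs, k, hk0, hk1, rfl⟩)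
    · exact Or.inl (Or.inl (Or.inl ⟨i, hi, k, ⟨hk0, by omega⟩, by ring_nf⟩))
    · exact Or.inl (Or.inl (Or.inr ⟨k, ⟨hk0, by omega⟩, j, hj, by ring_nf⟩))
    · -- diagonal line s at window k starts at cell (lo + k, lo + k + s)
      refine Or.inl (Or.inr ⟨max 0 (-s) + k, by omega, max 0 (-s) + k + s, by omega, ?_⟩)
      have h3 : max 0 (-s) + k + s + 1 = max 0 (-s) + k + 1 + s := by omega
      have h4 : max 0 (-s) + k + s + 2 = max 0 (-s) + k + 2 + s := by omega
      have h5 : max 0 (-s) + k + s + 3 = max 0 (-s) + k + 3 + s := by omega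
      rw [h3, h4, h5]
    · -- anti-diagonal line s at window k starts at cell (lo + k, s - (lo + k))
      refine Or.inr ⟨max 0 (s - t + 1) + k, by omega, s - (max 0 (s - t + 1) + k), by omega, ?_⟩
      have h3 : s - (max 0 (s - t + 1) + k) - 1 = s - (max 0 (s - t + 1) + k + 1) := by omega
      have h4 : s - (max 0 (s - t + 1) + k) - 2 = s - (max 0 (s - t + 1) + k + 2) := by omega
      have h5 : s - (max 0 (s - t + 1) + k) - 3 = s - (max 0 (s - t + 1) + k + 3) := by omega
      rw [h3, h4, h5]

-- ===== VERDICT (by name: the statement is the Claim_ definition above) =====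
theorem produto_spec : Claim_equal_produto := by
  intro matriz t _ _
  unfold Spec_produto
  by_cases h : t < 4
  · unfold produto_alt
    rw [if_pos h, produto_small matriz t h]
  · rw [produto_eq_LA, produto_alt_eq_LB matriz t h]
    exact foldlMax_eq_of_mem_iff _ _ (mem_LA_iff_LB matriz t)
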